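-- pv_equiv track=rewrite | github.com/Mr-Rajesh-108/problem_solving_DSA | Problem_of_Day/day_28/Police and Thieves.py | catchThieves
-- ===== SOURCE A (Python) =====
-- from collections import deque
--
-- def catchThieves(arr, k):
--     police = deque()
--     thieves = deque()
--     count = 0
--
--     for i in range(len(arr)):
--         if arr[i] == 'P':
--             police.append(i)
--         elif arr[i] == 'T':
--             thieves.append(i)
--
--     while police and thieves:
--         if abs(police[0] - thieves[0]) <= k:
--             count += 1
--             police.popleft()
--             thieves.popleft()
--         elif thieves[0] < police[0]:
--             thieves.popleft()
--         else:
--             police.popleft()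
--
--     return count
-- ===== SOURCE B (Python) =====
-- from collections import deque
--
-- def catchThieves(arr, k):
--     # single-pass online greedy: match each arrival against the pending
--     # opposite queue after evicting entries that fell out of the k-window
--     police = deque()
--     thieves = deque()
--     count = 0
--     for i, c in enumerate(arr):
--         if c == 'P':
--             while thieves and i - thieves[0] > k:
--                 thieves.popleft()
--             if thieves:
--                 thieves.popleft()
--                 count += 1
--             else:
--                 police.append(i)
--         elif c == 'T':
--             while police and i - police[0] > k:
--                 police.popleft()
--             if police:
--                 police.popleft()
--                 count += 1
--             else:
--                 thieves.append(i)
--     return count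
-- ===== Notes on version B (the rewrite author's own statement) =====
-- stated objective: alternative
-- what changed: Replaced A's two-phase algorithm (collect all police/thief indices first, then a separate two-pointer matching loop) by a single fused online pass that, at each arrival, evicts out-of-window pending indices of the opposite kind and matches greedily on the spot.
import Mathlib
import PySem

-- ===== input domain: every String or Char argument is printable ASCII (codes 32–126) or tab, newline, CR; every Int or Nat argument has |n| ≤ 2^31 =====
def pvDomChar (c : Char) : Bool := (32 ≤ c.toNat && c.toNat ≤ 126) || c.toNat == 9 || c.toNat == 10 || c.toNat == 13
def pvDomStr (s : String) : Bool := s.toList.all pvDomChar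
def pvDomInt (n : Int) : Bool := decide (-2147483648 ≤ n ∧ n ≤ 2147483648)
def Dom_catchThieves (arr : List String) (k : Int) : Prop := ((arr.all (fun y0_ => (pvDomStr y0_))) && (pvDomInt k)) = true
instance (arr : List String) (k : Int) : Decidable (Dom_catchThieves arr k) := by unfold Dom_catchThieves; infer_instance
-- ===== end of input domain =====

-- B fuses A's two phases (collect all indices, then two-pointer matching) into one
-- online window-pruned greedy pass; same O(n) cost, alternative algorithm.

-- ===== PORT A =====
-- first phase: for i in range(len(arr)): append i to police / thieves
def pvBuildStep (arr : List String) (st : List Int × List Int) (i : Int) : List Int × List Int :=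
  if PySem.List.pyGetD arr i "" = "P" then (st.1 ++ [i], st.2)
  else if PySem.List.pyGetD arr i "" = "T" then (st.1, st.2 ++ [i])
  else st

-- second phase: while police and thieves: …
def pvWhileA (k : Int) : List Int → List Int → Int → Int
  | p :: ps, t :: ts, c =>
      if |p - t| ≤ k then pvWhileA k ps ts (c + 1)
      else if t < p then pvWhileA k (p :: ps) ts c
      else pvWhileA k ps (t :: ts) c
  | _, _, c => c
termination_by p t _ => p.length + t.length

def catchThieves (arr : List String) (k : Int) : Int :=
  let st := (PySem.List.pyRange 0 (arr.length : Int) 1).foldl (pvBuildStep arr) ([], [])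
  pvWhileA k st.1 st.2 0

-- ===== PORT B =====
-- while q and i - q[0] > k: q.popleft()
def pvEvict (k i : Int) : List Int → List Int
  | [] => []
  | j :: rest => if i - j > k then pvEvict k i rest else j :: rest

-- body of 'for i, c in enumerate(arr)'
def pvStepB (k : Int) (st : List Int × List Int × Int) (pc : Int × String) : List Int × List Int × Int :=
  if pc.2 = "P" then
    match pvEvict k pc.1 st.2.1 with
    | _ :: ts => (st.1, ts, st.2.2 + 1)
    | [] => (st.1 ++ [pc.1], [], st.2.2)
  else if pc.2 = "T" then
    match pvEvict k pc.1 st.1 with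
    | _ :: ps => (ps, st.2.1, st.2.2 + 1)
    | [] => ([], st.2.1 ++ [pc.1], st.2.2)
  else st

def catchThieves_alt (arr : List String) (k : Int) : Int :=
  ((PySem.List.enumerate arr 0).foldl (pvStepB k) ([], [], 0)).2.2

-- ===== PRECONDITION & SPEC =====
def Spec_catchThieves (arr : List String) (k : Int) (out : Int) : Prop := out = catchThieves_alt arr k
instance (arr : List String) (k : Int) (out : Int) : Decidable (Spec_catchThieves arr k out) := by unfold Spec_catchThieves; infer_instance

-- ===== CLAIM (what is proved, stated in full; the proofs are below) =====
def Claim_equal_catchThieves : Prop := ∀ (arr : List String) (k : Int), Dom_catchThieves arr k → Spec_catchThieves arr k (catchThieves arr k)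

-- ===== LEMMAS AND PROOFS =====

-- indices of occurrences of c in s, counting from i (proof-side view of both programs)
def pvIdxs (c : String) : List String → Int → List Int
  | [], _ => []
  | x :: rest, i => if x = c then i :: pvIdxs c rest (i + 1) else pvIdxs c rest (i + 1)

theorem pvIdxs_ge (c : String) : ∀ (s : List String) (i : Int), ∀ x ∈ pvIdxs c s i, i ≤ x := by
  intro s
  induction s with
  | nil => intro i x hx; simp [pvIdxs] at hx
  | cons y rest ih =>
    intro i x hx
    simp only [pvIdxs] at hx
    split at hx
    · rcases List.mem_cons.1 hx with h | h
      · omega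
      · have := ih (i + 1) x h; omega
    · have := ih (i + 1) x hx; omega

theorem pvEvict_mem (k i : Int) : ∀ (T : List Int), ∀ x ∈ pvEvict k i T, x ∈ T := by
  intro T
  induction T with
  | nil => intro x hx; simp [pvEvict] at hx
  | cons j rest ih =>
    intro x hx
    simp only [pvEvict] at hx
    split at hx
    · exact List.mem_cons_of_mem _ (ih x hx)
    · exact hx

theorem pvEvict_head (k i : Int) : ∀ (T : List Int) (t : Int) (ts : List Int),
    pvEvict k i T = t :: ts → i - t ≤ k := by
  intro T
  induction T with
  | nil => intro t ts h; simp [pvEvict] at h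
  | cons j rest ih =>
    intro t ts h
    simp only [pvEvict] at h
    split at h
    · exact ih t ts h
    · cases h; omega

theorem pvWhileA_nil_left (k : Int) (T : List Int) (c : Int) : pvWhileA k [] T c = c := by
  cases T <;> simp [pvWhileA]

theorem pvWhileA_nil_right (k : Int) (P : List Int) (c : Int) : pvWhileA k P [] c = c := by
  cases P <;> simp [pvWhileA]

-- evicting stale thieves (all < i) against police all ≥ i does not change the match count
theorem pvWhileA_evict_thieves (k i : Int) (P : List Int) (hP : ∀ p ∈ P, i ≤ p) :
    ∀ (T1 rest : List Int) (c : Int), (∀ t ∈ T1, t < i) →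
      pvWhileA k P (T1 ++ rest) c = pvWhileA k P (pvEvict k i T1 ++ rest) c := by
  intro T1
  induction T1 with
  | nil => intro rest c _; simp [pvEvict]
  | cons t T1' ih =>
    intro rest c hT
    simp only [pvEvict]
    split
    · -- i - t > k : A's loop also drops t against any police front ≥ i
      rename_i hkt
      rw [← ih rest c (fun x hx => hT x (List.mem_cons_of_mem _ hx))]
      cases P with
      | nil => rw [pvWhileA_nil_left, pvWhileA_nil_left]
      | cons p P' =>
        have hpi : i ≤ p := hP p List.mem_cons_self
        have hti : t < i := hT t List.mem_cons_self
        have h1 : ¬ |p - t| ≤ k := by rw [abs_of_nonneg (by omega)]; omega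
        have h2 : t < p := by omega
        simp only [List.cons_append, pvWhileA, if_neg h1, if_pos h2]
    · rfl

-- symmetric: evicting stale police against thieves all ≥ i
theorem pvWhileA_evict_police (k i : Int) (T : List Int) (hT : ∀ t ∈ T, i ≤ t) :
    ∀ (P1 rest : List Int) (c : Int), (∀ p ∈ P1, p < i) →
      pvWhileA k (P1 ++ rest) T c = pvWhileA k (pvEvict k i P1 ++ rest) T c := by
  intro P1
  induction P1 with
  | nil => intro rest c _; simp [pvEvict]
  | cons p P1' ih =>
    intro rest c hP
    simp only [pvEvict]
    split
    · rename_i hkp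
      rw [← ih rest c (fun x hx => hP x (List.mem_cons_of_mem _ hx))]
      cases T with
      | nil => rw [pvWhileA_nil_right, pvWhileA_nil_right]
      | cons t T' =>
        have hti : i ≤ t := hT t List.mem_cons_self
        have hpi : p < i := hP p List.mem_cons_self
        have h1 : ¬ |p - t| ≤ k := by rw [abs_of_nonpos (by omega)]; omega
        have h2 : ¬ t < p := by omega
        simp only [List.cons_append, pvWhileA, if_neg h1, if_neg h2]
    · rfl

-- the fused online pass equals A's offline two-pointer run on pending ++ future indices
theorem pvBridge (k : Int) : ∀ (s : List String) (i : Int) (P T : List Int) (c : Int),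
    (P = [] ∨ T = []) → (∀ p ∈ P, p < i) → (∀ t ∈ T, t < i) →
    ((PySem.List.enumerate s i).foldl (pvStepB k) (P, T, c)).2.2
      = pvWhileA k (P ++ pvIdxs "P" s i) (T ++ pvIdxs "T" s i) c := by
  intro s
  induction s with
  | nil =>
    intro i P T c hdisj hP hT
    simp only [PySem.List.enumerate_nil, List.foldl_nil, pvIdxs, List.append_nil]
    rcases hdisj with h | h <;> subst h
    · rw [pvWhileA_nil_left]
    · rw [pvWhileA_nil_right]
  | cons x rest ih =>
    intro i P T c hdisj hP hT
    rw [PySem.List.enumerate_cons, List.foldl_cons]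
    by_cases hxP : x = "P"
    · subst hxP
      simp only [pvStepB, pvIdxs, if_neg (by decide : ¬("P" = "T")), if_true]
      rcases hEv : pvEvict k i T with _ | ⟨t, ts⟩
      · -- no thief in window: append i to police
        simp only
        rw [ih (i + 1) (P ++ [i]) [] c (Or.inr rfl)
            (by intro p hp; rcases List.mem_append.1 hp with h | h
                · exact lt_trans (hP p h) (by omega)
                · simp at h; omega)
            (by intro t ht; simp at ht)]
        rcases hdisj with h | h
        · subst h
          -- T may be nonempty but fully stale: rewrite RHS by the eviction lemma
          rw [show ([] : List Int) ++ i :: pvIdxs "P" rest (i + 1) = i :: pvIdxs "P" rest (i + 1) by rfl]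
          rw [pvWhileA_evict_thieves k i (i :: pvIdxs "P" rest (i + 1))
              (by intro p hp; rcases List.mem_cons.1 hp with h | h
                  · omega
                  · have := pvIdxs_ge "P" rest (i + 1) p h; omega) T (pvIdxs "T" rest (i + 1)) c hT]
          rw [hEv]
          simp
        · subst h; simp
      · -- a thief in window: match it
        have hTne : T ≠ [] := by intro h; subst h; simp [pvEvict] at hEv
        have hPnil : P = [] := hdisj.resolve_right hTne
        subst hPnil
        simp only
        have hts : ∀ q ∈ ts, q < i + 1 := by
          intro q hq
          have : q ∈ pvEvict k i T := by rw [hEv]; exact List.mem_cons_of_mem _ hq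
          have := hT q (pvEvict_mem k i T q this)
          omega
        rw [ih (i + 1) [] ts (c + 1) (Or.inl rfl) (by intro p hp; simp at hp) hts]
        simp only [List.nil_append]
        rw [pvWhileA_evict_thieves k i (i :: pvIdxs "P" rest (i + 1))
            (by intro p hp; rcases List.mem_cons.1 hp with h | h
                · omega
                · have := pvIdxs_ge "P" rest (i + 1) p h; omega) T (pvIdxs "T" rest (i + 1)) c hT]
        rw [hEv]
        have htmem : t ∈ T := pvEvict_mem k i T t (by rw [hEv]; exact List.mem_cons_self)
        have hti : t < i := hT t htmem
        have hwin : i - t ≤ k := pvEvict_head k i T t ts hEv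
        have habs : |i - t| ≤ k := by rw [abs_of_nonneg (by omega)]; omega
        simp only [List.cons_append, pvWhileA, if_pos habs]
    · by_cases hxT : x = "T"
      · subst hxT
        simp only [pvStepB, pvIdxs, if_neg (by decide : ¬("T" = "P")), if_true]
        rcases hEv : pvEvict k i P with _ | ⟨p, ps⟩
        · simp only
          rw [ih (i + 1) [] (T ++ [i]) c (Or.inl rfl)
              (by intro p hp; simp at hp)
              (by intro t ht; rcases List.mem_append.1 ht with h | h
                  · exact lt_trans (hT t h) (by omega)
                  · simp at h; omega)]
          rcases hdisj with h | h
          · subst h; simp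
          · subst h
            rw [show ([] : List Int) ++ i :: pvIdxs "T" rest (i + 1) = i :: pvIdxs "T" rest (i + 1) by rfl]
            rw [pvWhileA_evict_police k i (i :: pvIdxs "T" rest (i + 1))
                (by intro t ht; rcases List.mem_cons.1 ht with h | h
                    · omega
                    · have := pvIdxs_ge "T" rest (i + 1) t h; omega) P (pvIdxs "P" rest (i + 1)) c hP]
            rw [hEv]
            simp
        · -- a police officer in window: match
          have hPne : P ≠ [] := by intro h; subst h; simp [pvEvict] at hEv
          have hTnil : T = [] := hdisj.resolve_left hPne
          subst hTnil
          simp only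
          have hps : ∀ q ∈ ps, q < i + 1 := by
            intro q hq
            have : q ∈ pvEvict k i P := by rw [hEv]; exact List.mem_cons_of_mem _ hq
            have := hP q (pvEvict_mem k i P q this)
            omega
          rw [ih (i + 1) ps [] (c + 1) (Or.inr rfl) hps (by intro t ht; simp at ht)]
          simp only [List.nil_append]
          rw [pvWhileA_evict_police k i (i :: pvIdxs "T" rest (i + 1))
              (by intro t ht; rcases List.mem_cons.1 ht with h | h
                  · omega
                  · have := pvIdxs_ge "T" rest (i + 1) t h; omega) P (pvIdxs "P" rest (i + 1)) c hP]
          rw [hEv]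
          have hpmem : p ∈ P := pvEvict_mem k i P p (by rw [hEv]; exact List.mem_cons_self)
          have hpi : p < i := hP p hpmem
          have hwin : i - p ≤ k := pvEvict_head k i P p ps hEv
          have habs : |p - i| ≤ k := by rw [abs_of_nonpos (by omega)]; omega
          simp only [List.cons_append, pvWhileA, if_pos habs]
      · -- neither 'P' nor 'T': state unchanged
        simp only [pvStepB, pvIdxs, if_neg hxP, if_neg hxT]
        exact ih (i + 1) P T c hdisj
          (fun p hp => lt_trans (hP p hp) (by omega))
          (fun t ht => lt_trans (hT t ht) (by omega))

-- A's first phase builds exactly the occurrence-index lists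
theorem pvBuild_view (arr : List String) : ∀ (n a : Nat), arr.length - a = n → ∀ (P T : List Int),
    (PySem.List.pyRange (a : Int) (arr.length : Int) 1).foldl (pvBuildStep arr) (P, T)
      = (P ++ pvIdxs "P" (arr.drop a) (a : Int), T ++ pvIdxs "T" (arr.drop a) (a : Int)) := by
  intro n
  induction n with
  | zero =>
    intro a ha P T
    have hle : arr.length ≤ a := by omega
    rw [PySem.List.pyRange_one_eq_nil (by exact_mod_cast hle)]
    rw [List.drop_eq_nil_of_le hle]
    simp [pvIdxs]
  | succ m ih =>
    intro a ha P T
    have hlt : a < arr.length := by omega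
    rw [PySem.List.pyRange_one_cons (by exact_mod_cast hlt), List.foldl_cons]
    have hget : PySem.List.pyGetD arr (a : Int) "" = arr[a] := by
      rw [PySem.List.pyGetD_natCast, List.getD_eq_getElem arr "" hlt]
    have hdrop : arr.drop a = arr[a] :: arr.drop (a + 1) := List.drop_eq_getElem_cons hlt
    have hcast : ((a : Int) + 1) = ((a + 1 : Nat) : Int) := by push_cast; ring
    rw [hdrop]
    simp only [pvBuildStep, hget, pvIdxs]
    by_cases h1 : arr[a] = "P"
    · rw [if_pos h1, if_pos h1, if_neg (show ¬ arr[a] = "T" by simp [h1])]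
      rw [hcast, ih (a + 1) (by omega) (P ++ [(a : Int)]) T]
      simp
    · rw [if_neg h1, if_neg h1]
      by_cases h2 : arr[a] = "T"
      · rw [if_pos h2, if_pos h2]
        rw [hcast, ih (a + 1) (by omega) P (T ++ [(a : Int)])]
        simp
      · rw [if_neg h2, if_neg h2]
        rw [hcast, ih (a + 1) (by omega) P T]

-- ===== VERDICT (by name: the statement is the Claim_ definition above) =====
theorem catchThieves_spec : Claim_equal_catchThieves := by
  unfold Claim_equal_catchThieves
  intro arr k _
  unfold Spec_catchThieves catchThieves catchThieves_alt
  have hbuild := pvBuild_view arr arr.length 0 (by omega) [] []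
  simp only [Int.natCast_zero] at hbuild
  rw [hbuild]
  rw [pvBridge k arr 0 [] [] 0 (Or.inl rfl) (by intro p hp; simp at hp) (by intro t ht; simp at ht)]
  simp
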